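-- pv_equiv track=rewrite | github.com/toydogcat/ai-sch-exam | scripts/parse_112_ceec.py | markdown_tables_to_html
-- ===== SOURCE A (Python) =====
-- def render_table(lines):
--     if len(lines) < 2:
--         return "\n".join(lines)
--     sep = lines[1].strip()
--     if not (sep.startswith("|") and sep.endswith("|") and all(c in " |:-" for c in sep)):
--         return "\n".join(lines)
--     headers = [h.strip() for h in lines[0].split("|")[1:-1]]
--     rows = []
--     for line in lines[2:]:
--         cols = [c.strip() for c in line.split("|")[1:-1]]
--         cols += [""] * max(0, len(headers) - len(cols))
--         rows.append(cols[:len(headers)])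
--     html = ['<div class="custom-table-container" style="overflow-x:auto; margin: 1.5rem 0; white-space: normal;">']
--     html.append('<table class="custom-exam-table" style="width:100%; border-collapse: collapse; border: 1px solid #dee2e6; font-size: 1rem; background: #fff; border-radius: 6px; white-space: normal;">')
--     html.append('<thead style="background: #f8f9fa; white-space: normal;"><tr>')
--     for h in headers:
--         html.append(f'<th style="border: 1px solid #dee2e6; padding: 12px 16px; text-align: left; font-weight: 700; color: #2c3e50; white-space: normal;">{h}</th>')
--     html.append('</tr></thead><tbody style="white-space: normal;">')
--     for row in rows:
--         html.append('<tr style="white-space: normal;">')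
--         for cell in row:
--             html.append(f'<td style="border: 1px solid #dee2e6; padding: 12px 16px; color: #34495e; line-height: 1.6; white-space: normal;">{cell}</td>')
--         html.append('</tr>')
--     html.append('</tbody></table></div>')
--     return "".join(html)
--
-- def markdown_tables_to_html(text):
--     lines = text.splitlines()
--     out = []
--     table = []
--     for line in lines:
--         stripped = line.strip()
--         if stripped.startswith("|") and stripped.endswith("|") and stripped.count("|") > 1:
--             table.append(stripped)
--             continue
--         if table:
--             out.append(render_table(table))
--             table = []
--         out.append(line)
--     if table:
--         out.append(render_table(table))
--     return "\n".join(out)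
-- ===== SOURCE B (Python) =====
-- # B: run-scanning decomposition — find each maximal run of table lines with an
-- # inner index scan and render it at once, instead of A's accumulate-and-flush loop.
--
-- def render_table(lines):
--     if len(lines) < 2:
--         return "\n".join(lines)
--     sep = lines[1].strip()
--     if not (sep.startswith("|") and sep.endswith("|") and all(c in " |:-" for c in sep)):
--         return "\n".join(lines)
--     headers = [h.strip() for h in lines[0].split("|")[1:-1]]
--     rows = []
--     for line in lines[2:]:
--         cols = [c.strip() for c in line.split("|")[1:-1]]
--         cols += [""] * max(0, len(headers) - len(cols))
--         rows.append(cols[:len(headers)])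
--     html = ['<div class="custom-table-container" style="overflow-x:auto; margin: 1.5rem 0; white-space: normal;">']
--     html.append('<table class="custom-exam-table" style="width:100%; border-collapse: collapse; border: 1px solid #dee2e6; font-size: 1rem; background: #fff; border-radius: 6px; white-space: normal;">')
--     html.append('<thead style="background: #f8f9fa; white-space: normal;"><tr>')
--     for h in headers:
--         html.append(f'<th style="border: 1px solid #dee2e6; padding: 12px 16px; text-align: left; font-weight: 700; color: #2c3e50; white-space: normal;">{h}</th>')
--     html.append('</tr></thead><tbody style="white-space: normal;">')
--     for row in rows:
--         html.append('<tr style="white-space: normal;">')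
--         for cell in row:
--             html.append(f'<td style="border: 1px solid #dee2e6; padding: 12px 16px; color: #34495e; line-height: 1.6; white-space: normal;">{cell}</td>')
--         html.append('</tr>')
--     html.append('</tbody></table></div>')
--     return "".join(html)
--
-- def _is_table_line(line):
--     s = line.strip()
--     return s.startswith("|") and s.endswith("|") and s.count("|") > 1
--
-- def markdown_tables_to_html(text):
--     lines = text.splitlines()
--     out = []
--     i = 0
--     n = len(lines)
--     while i < n:
--         if _is_table_line(lines[i]):
--             j = i
--             while j < n and _is_table_line(lines[j]):
--                 j += 1
--             out.append(render_table([l.strip() for l in lines[i:j]]))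
--             i = j
--         else:
--             out.append(lines[i])
--             i += 1
--     return "\n".join(out)
-- ===== Notes on version B (the rewrite author's own statement) =====
-- stated objective: alternative
-- what changed: A's accumulate-and-flush loop with pending-table state is replaced by a run-scanner that locates each maximal block of consecutive table lines with an inner index scan and renders it in one step; render_table is kept unchanged.
import Mathlib
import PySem

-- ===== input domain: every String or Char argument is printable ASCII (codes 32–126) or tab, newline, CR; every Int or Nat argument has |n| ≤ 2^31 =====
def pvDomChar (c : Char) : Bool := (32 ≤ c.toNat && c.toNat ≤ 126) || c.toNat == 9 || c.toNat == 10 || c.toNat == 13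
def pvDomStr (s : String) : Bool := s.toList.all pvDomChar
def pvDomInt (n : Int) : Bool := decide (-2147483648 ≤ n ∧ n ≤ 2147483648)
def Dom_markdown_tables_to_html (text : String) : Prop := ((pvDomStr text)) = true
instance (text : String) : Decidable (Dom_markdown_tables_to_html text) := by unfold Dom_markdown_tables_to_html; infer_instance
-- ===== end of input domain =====

-- B replaces A's accumulate-and-flush loop by a run-scanner that finds each maximal
-- block of table lines and renders it at once (objective: alternative decomposition).

-- ===== PORT A =====
-- shared helper: literal port of render_table (used unchanged by both A and B)
def renderTable (lines : List String) : String :=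
  match lines with
  | l0 :: l1 :: rest =>
    let sep := PySem.Str.strip l1
    if PySem.Str.startswith sep "|" && PySem.Str.endswith sep "|"
        && sep.toList.all (fun c => (" |:-".toList).contains c) then
      let headers := (PySem.List.slice ((PySem.Str.split? l0 "|").getD []) (some 1) (some (-1))).map PySem.Str.strip
      -- the for-append loop over lines[2:] building rows, as a map
      let rows := rest.map (fun line =>
        let cols := (PySem.List.slice ((PySem.Str.split? line "|").getD []) (some 1) (some (-1))).map PySem.Str.strip
        -- Nat subtraction = Python's max(0, len(headers) - len(cols))
        let cols := cols ++ List.replicate (headers.length - cols.length) ""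
        cols.take headers.length)
      let html : List String :=
        ["<div class=\"custom-table-container\" style=\"overflow-x:auto; margin: 1.5rem 0; white-space: normal;\">",
         "<table class=\"custom-exam-table\" style=\"width:100%; border-collapse: collapse; border: 1px solid #dee2e6; font-size: 1rem; background: #fff; border-radius: 6px; white-space: normal;\">",
         "<thead style=\"background: #f8f9fa; white-space: normal;\"><tr>"]
        ++ headers.map (fun h => "<th style=\"border: 1px solid #dee2e6; padding: 12px 16px; text-align: left; font-weight: 700; color: #2c3e50; white-space: normal;\">" ++ h ++ "</th>")
        ++ ["</tr></thead><tbody style=\"white-space: normal;\">"]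
        ++ rows.flatMap (fun row =>
             "<tr style=\"white-space: normal;\">"
             :: row.map (fun cell => "<td style=\"border: 1px solid #dee2e6; padding: 12px 16px; color: #34495e; line-height: 1.6; white-space: normal;\">" ++ cell ++ "</td>")
             ++ ["</tr>"])
        ++ ["</tbody></table></div>"]
      PySem.Str.join "" html
    else PySem.Str.join "\n" lines
  | _ => PySem.Str.join "\n" lines   -- len(lines) < 2

-- A's loop state is (out, table); the end-of-loop flush is repeated after the fold.
def markdown_tables_to_html (text : String) : String :=
  let lines := PySem.Str.splitlines text
  let st := lines.foldl (fun (st : List String × List String) line =>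
      let stripped := PySem.Str.strip line
      if PySem.Str.startswith stripped "|" && PySem.Str.endswith stripped "|"
          && decide (1 < PySem.Str.count stripped "|") then
        (st.1, st.2 ++ [stripped])
      else
        let out := if st.2 = [] then st.1 else st.1 ++ [renderTable st.2]
        (out ++ [line], [])) ([], [])
  let out := if st.2 = [] then st.1 else st.1 ++ [renderTable st.2]
  PySem.Str.join "\n" out

-- ===== PORT B =====
def isTableLine (line : String) : Bool :=
  let s := PySem.Str.strip line
  PySem.Str.startswith s "|" && PySem.Str.endswith s "|" && decide (1 < PySem.Str.count s "|")

-- B's while-loop: each maximal run of table lines (the inner j-scan) is takeWhile/dropWhile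
def goB : List String → List String
  | [] => []
  | l :: ls =>
    if isTableLine l then
      renderTable ((l :: ls.takeWhile isTableLine).map PySem.Str.strip)
        :: goB (ls.dropWhile isTableLine)
    else l :: goB ls
termination_by ls => ls.length
decreasing_by
  · exact Nat.lt_succ_of_le (List.length_dropWhile_le _ _)
  · exact Nat.lt_succ_self _

def markdown_tables_to_html_alt (text : String) : String :=
  PySem.Str.join "\n" (goB (PySem.Str.splitlines text))

-- ===== PRECONDITION & SPEC =====
def Spec_markdown_tables_to_html (text : String) (out : String) : Prop := out = markdown_tables_to_html_alt text
instance (text : String) (out : String) : Decidable (Spec_markdown_tables_to_html text out) := by unfold Spec_markdown_tables_to_html; infer_instance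

-- ===== CLAIM =====
def Claim_equal_markdown_tables_to_html : Prop := ∀ (text : String), Dom_markdown_tables_to_html text → Spec_markdown_tables_to_html text (markdown_tables_to_html text)

-- ===== LEMMAS AND PROOFS =====
-- goB with a pending (already-stripped) table prefix: mirrors A's loop state
def pendB (table : List String) : List String → List String
  | [] => if table = [] then [] else [renderTable table]
  | l :: ls =>
    if isTableLine l then pendB (table ++ [PySem.Str.strip l]) ls
    else (if table = [] then [] else [renderTable table]) ++ l :: pendB [] ls

lemma foldA_eq_pendB (lines : List String) : ∀ (out table : List String),
    (let st := lines.foldl (fun (st : List String × List String) line =>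
        let stripped := PySem.Str.strip line
        if PySem.Str.startswith stripped "|" && PySem.Str.endswith stripped "|"
            && decide (1 < PySem.Str.count stripped "|") then
          (st.1, st.2 ++ [stripped])
        else
          let out := if st.2 = [] then st.1 else st.1 ++ [renderTable st.2]
          (out ++ [line], [])) (out, table)
     if st.2 = [] then st.1 else st.1 ++ [renderTable st.2])
    = out ++ pendB table lines := by
  induction lines with
  | nil =>
    intro out table
    simp only [List.foldl_nil, pendB]
    by_cases h : table = [] <;> simp [h]
  | cons l ls ih =>
    intro out table
    simp only [List.foldl_cons, pendB]
    by_cases hl : isTableLine l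
    · have hl' : (PySem.Str.startswith (PySem.Str.strip l) "|" && PySem.Str.endswith (PySem.Str.strip l) "|"
          && decide (1 < PySem.Str.count (PySem.Str.strip l) "|")) = true := hl
      simp only [hl', if_pos, hl]
      exact ih out (table ++ [PySem.Str.strip l])
    · have hl' : (PySem.Str.startswith (PySem.Str.strip l) "|" && PySem.Str.endswith (PySem.Str.strip l) "|"
          && decide (1 < PySem.Str.count (PySem.Str.strip l) "|")) = false := by
        simpa [isTableLine] using hl
      simp only [hl', if_false, Bool.false_eq_true, hl]
      rw [ih ((if table = [] then out else out ++ [renderTable table]) ++ [l]) []]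
      by_cases h : table = [] <;> simp [h]

lemma pendB_eq_goB (lines : List String) : ∀ (table : List String),
    pendB table lines
    = if table = [] then goB lines
      else renderTable (table ++ (lines.takeWhile isTableLine).map PySem.Str.strip)
            :: goB (lines.dropWhile isTableLine) := by
  induction lines with
  | nil =>
    intro table
    by_cases h : table = [] <;> simp [pendB, goB, h]
  | cons l ls ih =>
    intro table
    by_cases hl : isTableLine l
    · rw [pendB, if_pos hl, ih (table ++ [PySem.Str.strip l])]
      simp only [List.append_eq_nil_iff, List.cons_ne_self, and_false, if_false,
        List.takeWhile_cons_of_pos hl, List.dropWhile_cons_of_pos hl]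
      by_cases h : table = []
      · subst h; rw [goB, if_pos hl]; simp
      · rw [if_neg h]; simp
    · rw [pendB, if_neg hl, ih [], if_pos rfl]
      by_cases h : table = []
      · subst h
        rw [goB, if_neg hl]
        simp
      · rw [if_neg h]
        simp only [List.takeWhile_cons_of_neg hl, List.dropWhile_cons_of_neg hl,
          List.map_nil, List.append_nil]
        rw [goB, if_neg hl]
        simp
        exact h

-- ===== VERDICT =====
theorem markdown_tables_to_html_spec : Claim_equal_markdown_tables_to_html := by
  intro text _
  show markdown_tables_to_html text = markdown_tables_to_html_alt text
  have h : markdown_tables_to_html text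
      = PySem.Str.join "\n" ([] ++ pendB [] (PySem.Str.splitlines text)) :=
    congrArg (PySem.Str.join "\n") (foldA_eq_pendB (PySem.Str.splitlines text) [] [])
  rw [h, pendB_eq_goB, if_pos rfl]
  rfl
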